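-- pv_equiv track=rewrite | github.com/penserbjorne/clase-lenguajesdeprogramacion-2018-1 | Programa3/LPG03P03_AEPS_BLR_CLOS.py | comp2
-- ===== SOURCE A (Python) =====
-- def binario(num):
-- 	"""
-- 	funcion binario
--
-- 	Recive un numero decimal y lo convierte a su valor absoluto en binario al reves.
-- 	Divide sucesivamente al numero entre dos y guarda el residuo en una lista, este es el numero
-- 	binario.
--
-- 	args:
-- 	num: numero decimal a convertir
--
-- 	returns:
-- 	bi(list): lista con digitos binarios
--
-- 	"""
-- 	bi = []
-- 	num = abs(int(num))
-- 	while num >0: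
-- 		res = num % 2
-- 		bi.append(res)
--
-- 		num = num //2
--
-- 	return bi
--
-- def comp1(numb):
-- 	"""
-- 	funcion comp1
-- 	convierte a un numero decimal a complemento a1
-- 	manda a llamar a la funcion binario para obtener el valor absoluto en
-- 	binario, si es que el numero es negativo invierte cada uno de los digitos
-- 	del numero y le anexa el bit de signo correspondiente y lo invierte para ponerlo en el orden correcto
-- 	si es positivo solamente le anexa el bit de signo y lo invierte
--
-- 	args:
-- 	num: numero decimal a convertir
--
-- 	returns:
-- 	c11(list): lista con digitos en complemento a 1
--
-- 	"""
--
-- 	bi= binario(numb)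
-- 	c11 = []
-- 	if int(numb) < 0:
-- 		for x in bi:
-- 			c11.append(int( not x))
--
-- 		c11.append(1)
-- 		c11.reverse()
-- 	else:
-- 		c11 = bi
-- 		c11.append(0)
-- 		c11.reverse()
-- 	return  c11
--
-- def comp2(numb):
-- 	"""
-- 	funcion comp2
-- 	convierte a un numero decimal a complemento a 2
-- 	manda a llamar a la funcion comp1 para obtener el valor  en
-- 	comp1.
-- 	Recorre los digitos empezando per el bit menos significativo obteniendo
-- 	su negado hasta encontrarse con un 0, esto es equivalente a sumarle 1
--
-- 	args:
-- 	num: numero decimal a convertir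
--
-- 	returns:
-- 	c22(list): lista con digitos en complemento a 2
--
-- 	"""
-- 	c1 = comp1(numb)
-- 	c22 = []
-- 	if int(numb) < 0:
-- 		lsb = 0
-- 		while lsb == 0:
-- 			lsb = int(not c1.pop())
-- 			c22.append(lsb)
-- 		c1.reverse()
-- 		c22 = c22 + c1
-- 		c22.reverse()
-- 	else:
-- 		c22 = c1
-- 	return c22
-- ===== SOURCE B (Python) =====
-- def comp2(numb):
--     """Two's-complement bit list via modular arithmetic: width = bit_length+1,
--     value = numb mod 2**width, then extract the bits."""
--     n = int(numb)
--     width = abs(n).bit_length() + 1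
--     val = n % (1 << width)
--     bits = []
--     for _ in range(width):
--         bits.append(val % 2)
--         val //= 2
--     return bits[::-1]
-- ===== Notes on version B (the rewrite author's own statement) =====
-- stated objective: simpler
-- what changed: Replaces A's three-pass pipeline (binary expansion, one's-complement bit flip with sign bit, LSB ripple-carry 'add one' pop loop with list reversals) by a modular-arithmetic closed form (reduce numb modulo the power of two of width bit_length+1) followed by a single bit-extraction loop.
import Mathlib
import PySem

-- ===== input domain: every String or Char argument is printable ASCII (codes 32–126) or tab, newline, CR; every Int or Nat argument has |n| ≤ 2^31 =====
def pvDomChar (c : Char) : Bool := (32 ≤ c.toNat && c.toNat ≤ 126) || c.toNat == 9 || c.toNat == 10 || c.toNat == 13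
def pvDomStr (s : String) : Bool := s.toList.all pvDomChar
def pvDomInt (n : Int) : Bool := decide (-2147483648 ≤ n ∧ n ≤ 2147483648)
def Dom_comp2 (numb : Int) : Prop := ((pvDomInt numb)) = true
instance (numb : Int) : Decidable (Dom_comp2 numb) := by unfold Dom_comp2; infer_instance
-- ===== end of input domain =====

-- B replaces A's one's-complement construction and LSB ripple "add one" loop by the
-- modular closed form (numb reduced modulo the power of two of width bit_length+1), reading the bits off directly (simpler).

-- ===== PORT A =====
-- binario: while num > 0: append num % 2; num //= 2  (recursion on the natAbs)
def binGo : Nat → List Int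
  | 0 => []
  | n+1 => (((n+1) % 2 : Nat) : Int) :: binGo ((n+1)/2)
decreasing_by exact Nat.div_lt_self (Nat.succ_pos n) (by omega)

def binario (num : Int) : List Int := binGo num.natAbs

def comp1 (numb : Int) : List Int :=
  let bi := binario numb
  if numb < 0 then ((bi.map (fun x => if x = 0 then (1:Int) else 0)) ++ [1]).reverse
  else (bi ++ [0]).reverse

-- the while-loop of comp2: pops from the END of c1; modelled as head-recursion on c1.reverse
-- (same elements in the same order). The [] case is Python's IndexError, unreachable here.
def ripple : List Int → List Int → List Int × List Int
  | [], c22 => ([], c22)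
  | x :: rest, c22 =>
    let lsb : Int := if x = 0 then 1 else 0
    if lsb = 0 then ripple rest (c22 ++ [lsb]) else (rest, c22 ++ [lsb])

def comp2 (numb : Int) : List Int :=
  let c1 := comp1 numb
  if numb < 0 then
    let p := ripple c1.reverse []
    (p.2 ++ p.1).reverse
  else c1

-- ===== PORT B =====
-- the for-loop of Source B: width iterations of (append val % 2; val //= 2)
def altBits : Nat → Int → List Int
  | 0, _ => []
  | k+1, v => PySem.Int.mod v 2 :: altBits k (PySem.Int.floordiv v 2)

def comp2_alt (numb : Int) : List Int :=
  let width := PySem.Int.bitLength numb + 1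
  let val := PySem.Int.mod numb ((1:Int) <<< width)
  (altBits width val).reverse

-- ===== PRECONDITION & SPEC =====
def Spec_comp2 (numb : Int) (out : List Int) : Prop := out = comp2_alt numb
instance (numb : Int) (out : List Int) : Decidable (Spec_comp2 numb out) := by unfold Spec_comp2; infer_instance

-- ===== CLAIM (what is proved, stated in full; the proofs are below) =====
def Claim_equal_comp2 : Prop := ∀ (numb : Int), Dom_comp2 numb → Spec_comp2 numb (comp2 numb)

-- ===== LEMMAS AND PROOFS =====

-- value of a LSB-first bit list
def toVal : List Int → Int
  | [] => 0
  | x :: r => x + 2 * toVal r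

def IsBits (l : List Int) : Prop := ∀ x ∈ l, x = 0 ∨ x = 1

-- the effect of the ripple loop: flip the leading (LSB-side) run of 1s and the first 0
def incList : List Int → List Int
  | [] => []
  | x :: r => if x = 0 then 1 :: r else 0 :: incList r

theorem toVal_append (a b : List Int) :
    toVal (a ++ b) = toVal a + 2 ^ a.length * toVal b := by
  induction a with
  | nil => simp [toVal]
  | cons x r ih => simp [toVal, ih, pow_succ]; ring

theorem toVal_uniq : ∀ (l1 l2 : List Int), IsBits l1 → IsBits l2 →
    l1.length = l2.length → toVal l1 = toVal l2 → l1 = l2 := by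
  intro l1
  induction l1 with
  | nil => intro l2 _ _ h _; exact (List.length_eq_zero_iff.mp h.symm).symm
  | cons x r ih =>
    intro l2 hb1 hb2 hlen hval
    cases l2 with
    | nil => simp at hlen
    | cons y s =>
      have hx := hb1 x (by simp)
      have hy := hb2 y (by simp)
      simp [toVal] at hval
      have hxy : x = y := by omega
      have : toVal r = toVal s := by omega
      have := ih s (fun z hz => hb1 z (by simp [hz])) (fun z hz => hb2 z (by simp [hz]))
        (by simpa using hlen) this
      simp [hxy, this]

theorem binGo_toVal : ∀ m : Nat, toVal (binGo m) = (m : Int) := by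
  intro m
  induction m using Nat.strong_induction_on with
  | _ m ih =>
    match m with
    | 0 => simp [binGo, toVal]
    | n+1 =>
      rw [binGo, toVal, ih ((n+1)/2) (Nat.div_lt_self (Nat.succ_pos n) (by omega))]
      push_cast
      omega

theorem binGo_length : ∀ m : Nat, (binGo m).length = PySem.Int.bitLength (m : Int) := by
  intro m
  induction m using Nat.strong_induction_on with
  | _ m ih =>
    match m with
    | 0 => simp [binGo, PySem.Int.bitLength_zero]
    | n+1 =>
      rw [binGo, List.length_cons, ih ((n+1)/2) (Nat.div_lt_self (Nat.succ_pos n) (by omega)),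
        PySem.Int.bitLength_natCast (show 0 < n+1 by omega)]

theorem binGo_bits : ∀ m : Nat, IsBits (binGo m) := by
  intro m
  induction m using Nat.strong_induction_on with
  | _ m ih =>
    match m with
    | 0 => intro x hx; simp [binGo] at hx
    | n+1 =>
      intro x hx
      rw [binGo] at hx
      rcases List.mem_cons.mp hx with h | h
      · subst h; omega
      · exact ih ((n+1)/2) (Nat.div_lt_self (Nat.succ_pos n) (by omega)) x h

theorem binGo_mem_one : ∀ m : Nat, 0 < m → (1:Int) ∈ binGo m := by
  intro m
  induction m using Nat.strong_induction_on with
  | _ m ih =>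
    match m with
    | 0 => omega
    | n+1 =>
      intro _
      rw [binGo]
      by_cases h : (n+1) % 2 = 1
      · simp [h]
      · have h2 : 0 < (n+1)/2 := by omega
        exact List.mem_cons_of_mem _ (ih ((n+1)/2) (Nat.div_lt_self (Nat.succ_pos n) (by omega)) h2)

-- flip map (the int(not x) of comp1)
theorem flip_toVal (l : List Int) (hb : IsBits l) :
    toVal (l.map (fun x => if x = 0 then (1:Int) else 0)) = 2 ^ l.length - 1 - toVal l := by
  induction l with
  | nil => simp [toVal]
  | cons x r ih =>
    have hx := hb x (by simp)
    have hr := ih (fun z hz => hb z (by simp [hz]))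
    rcases hx with h | h <;>
      simp [toVal, h, hr, pow_succ] <;> ring

theorem flip_bits (l : List Int) :
    IsBits (l.map (fun x => if x = 0 then (1:Int) else 0)) := by
  intro x hx
  rcases List.mem_map.mp hx with ⟨y, _, rfl⟩
  by_cases h : y = 0 <;> simp [h]

theorem incList_toVal : ∀ l : List Int, IsBits l → (0:Int) ∈ l →
    toVal (incList l) = toVal l + 1 := by
  intro l
  induction l with
  | nil => intro _ h; simp at h
  | cons x r ih =>
    intro hb hm
    by_cases h : x = 0
    · simp [incList, h, toVal]; ring
    · have hx := hb x (by simp)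
      have hx1 : x = 1 := by omega
      have hm' : (0:Int) ∈ r := (List.mem_cons.mp hm).resolve_left (by omega)
      rw [incList, if_neg h, toVal, toVal, ih (fun z hz => hb z (by simp [hz])) hm', hx1]
      ring

theorem incList_length : ∀ l : List Int, (incList l).length = l.length := by
  intro l
  induction l with
  | nil => rfl
  | cons x r ih => by_cases h : x = 0 <;> simp [incList, h, ih]

theorem incList_bits : ∀ l : List Int, IsBits l → IsBits (incList l) := by
  intro l
  induction l with
  | nil => intro h; exact h
  | cons x r ih =>
    intro hb z hz
    by_cases h : x = 0
    · rw [incList, if_pos h] at hz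
      rcases List.mem_cons.mp hz with h0 | h0
      · omega
      · exact hb z (by simp [h0])
    · rw [incList, if_neg h] at hz
      rcases List.mem_cons.mp hz with h0 | h0
      · omega
      · exact ih (fun y hy => hb y (by simp [hy])) z h0

theorem ripple_spec : ∀ (l acc : List Int), (0:Int) ∈ l →
    (ripple l acc).2 ++ (ripple l acc).1 = acc ++ incList l := by
  intro l
  induction l with
  | nil => intro acc h; simp at h
  | cons x rest ih =>
    intro acc hm
    by_cases h : x = 0
    · simp [ripple, incList, h]
    · have hm' : (0:Int) ∈ rest := (List.mem_cons.mp hm).resolve_left (by omega)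
      rw [ripple, incList, if_neg h]
      simpa [h, List.append_assoc] using ih (acc ++ [(0:Int)]) hm'

theorem altBits_length : ∀ (k : Nat) (v : Int), (altBits k v).length = k := by
  intro k
  induction k with
  | zero => intro v; rfl
  | succ n ih => intro v; simp [altBits, ih]

theorem altBits_bits : ∀ (k : Nat) (v : Int), IsBits (altBits k v) := by
  intro k
  induction k with
  | zero => intro v x hx; simp [altBits] at hx
  | succ n ih =>
    intro v x hx
    rw [altBits] at hx
    rcases List.mem_cons.mp hx with h | h
    · have h1 : 0 ≤ PySem.Int.mod v 2 := PySem.Int.mod_nonneg v (by norm_num)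
      have h2 : PySem.Int.mod v 2 < 2 := PySem.Int.mod_lt v (by norm_num)
      omega
    · exact ih _ x h

theorem altBits_toVal : ∀ (k : Nat) (v : Int), 0 ≤ v → v < 2 ^ k →
    toVal (altBits k v) = v := by
  intro k
  induction k with
  | zero => intro v h1 h2; simp at h2; simp [altBits, toVal]; omega
  | succ n ih =>
    intro v h1 h2
    rw [altBits, toVal, PySem.Int.mod_eq_emod_of_pos (show (0:Int) < 2 by norm_num),
      PySem.Int.floordiv_eq_ediv_of_pos (show (0:Int) < 2 by norm_num)]
    rw [ih (v / 2) (by omega) (by rw [pow_succ] at h2; omega)]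
    omega

-- A's output, both cases, as an explicit reversed bit list
theorem comp2_nonneg (n : Int) (h : ¬ n < 0) :
    comp2 n = (binGo n.natAbs ++ [0]).reverse := by
  simp [comp2, comp1, binario, h]

theorem comp2_neg (n : Int) (h : n < 0) :
    comp2 n = (incList ((binGo n.natAbs).map (fun x => if x = 0 then (1:Int) else 0) ++ [1])).reverse := by
  have hm : 0 < n.natAbs := by omega
  have h1 : (1:Int) ∈ binGo n.natAbs := binGo_mem_one _ hm
  have h0 : (0:Int) ∈ (binGo n.natAbs).map (fun x => if x = 0 then (1:Int) else 0) ++ [1] := by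
    refine List.mem_append_left _ ?_
    exact List.mem_map.mpr ⟨1, h1, by norm_num⟩
  simp only [comp2, comp1, binario, if_pos h, List.reverse_reverse]
  rw [ripple_spec _ [] h0, List.nil_append]

theorem one_shiftLeft_int (k : Nat) : ((1:Int) <<< k) = 2 ^ k := by
  rw [Int.shiftLeft_eq]; ring

theorem bitLength_natAbs (n : Int) :
    PySem.Int.bitLength ((n.natAbs : Nat) : Int) = PySem.Int.bitLength n := by
  rcases Int.natAbs_eq n with h | h
  · rw [← h]
  · rw [show ((n.natAbs : Nat) : Int) = -n by omega, PySem.Int.bitLength_neg]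

theorem main_eq (n : Int) : comp2 n = comp2_alt n := by
  simp only [comp2_alt]
  set s := PySem.Int.bitLength n with hs
  set w := s + 1 with hw
  have hMpos : (0:Int) < 2 ^ w := by positivity
  rw [one_shiftLeft_int, PySem.Int.mod_eq_emod_of_pos hMpos]
  have hlen : (binGo n.natAbs).length = s := by
    rw [binGo_length, bitLength_natAbs]
  have hmlt : (n.natAbs : Int) < 2 ^ s := by
    have := PySem.Int.lt_two_pow_bitLength n
    exact_mod_cast this
  have hsw : (2:Int) ^ s < 2 ^ w := by
    have : (2:Int) ^ w = 2 ^ s * 2 := by rw [hw, pow_succ]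
    omega
  by_cases h : n < 0
  · -- negative case
    have hneg : n = -(n.natAbs : Int) := by omega
    have hval : n % 2 ^ w = 2 ^ w + n := by
      have h1 : (n + 2 ^ w) % 2 ^ w = n % 2 ^ w := by
        simp [Int.add_mul_emod_self_left (a := n) (b := 2 ^ w) (c := 1)]
      rw [← h1, Int.emod_eq_of_lt (by omega) (by omega)]
      ring
    rw [comp2_neg n h, hval]
    congr 1
    apply toVal_uniq
    · exact incList_bits _ (by
        intro x hx
        rcases List.mem_append.mp hx with h1 | h1
        · exact flip_bits _ x h1
        · simp at h1; omega)
    · exact altBits_bits _ _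
    · rw [incList_length, List.length_append, List.length_map, hlen, altBits_length]; simp [hw]
    · have h0 : (0:Int) ∈ (binGo n.natAbs).map (fun x => if x = 0 then (1:Int) else 0) ++ [1] := by
        refine List.mem_append_left _ ?_
        exact List.mem_map.mpr ⟨1, binGo_mem_one _ (by omega), by norm_num⟩
      rw [incList_toVal _ (by
            intro x hx
            rcases List.mem_append.mp hx with h1 | h1
            · exact flip_bits _ x h1
            · simp at h1; omega) h0,
        toVal_append, flip_toVal _ (binGo_bits _), binGo_toVal, List.length_map, hlen,
        altBits_toVal w _ (by omega) (by omega)]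
      have h2w : (2:Int) ^ w = 2 ^ s * 2 := by rw [hw, pow_succ]
      simp only [toVal]
      omega
  · -- nonnegative case
    have hval : n % 2 ^ w = n := Int.emod_eq_of_lt (by omega) (by omega)
    rw [comp2_nonneg n h, hval]
    congr 1
    apply toVal_uniq
    · intro x hx
      rcases List.mem_append.mp hx with h1 | h1
      · exact binGo_bits _ x h1
      · simp at h1; omega
    · exact altBits_bits _ _
    · rw [List.length_append, hlen, altBits_length]; rfl
    · rw [toVal_append, binGo_toVal, altBits_toVal w n (by omega) (by omega)]
      simp [toVal]
      omega

-- ===== VERDICT (by name: the statement is the Claim_ definition above) =====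
theorem comp2_spec : Claim_equal_comp2 := by
  intro numb _
  exact main_eq numb
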